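-- pv_equiv track=rewrite | github.com/hpnyaggerman/Orb | backend/passes/refine/contrastive_negation.py | _split_contractions
-- ===== SOURCE A (Python) =====
-- _BE_CONTRACTION_STARTERS = frozenset({
--     "i", "you", "he", "she", "it", "we", "they",
--     "that", "this", "there", "here",
--     "who", "what", "where", "when", "how",
-- })
--
-- def _split_contractions(tokens: list[str]) -> list[str]:
--     """Split pronoun+be contractions:  she's → she 's,  they're → they 're."""
--     result = []
--     for token in tokens:
--         low = token.lower()
--         split = False
--         for suffix in ("'s", "'re", "'m"):
--             if low.endswith(suffix) and len(token) > len(suffix):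
--                 stem = token[: -len(suffix)]
--                 if stem.lower() in _BE_CONTRACTION_STARTERS:
--                     result.append(stem)
--                     result.append(suffix)
--                     split = True
--                     break
--         if not split:
--             result.append(token)
--     return result
-- ===== SOURCE B (Python) =====
-- _BE_CONTRACTION_STARTERS = frozenset({
--     "i", "you", "he", "she", "it", "we", "they",
--     "that", "this", "there", "here",
--     "who", "what", "where", "when", "how",
-- })
--
-- _BE_SUFFIXES = frozenset({"'s", "'re", "'m"})
--
--
-- def _expand(token):
--     stem, sep, after = token.rpartition("'")
--     if sep:
--         suffix = ("'" + after).lower()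
--         if suffix in _BE_SUFFIXES and stem and stem.lower() in _BE_CONTRACTION_STARTERS:
--             return [stem, suffix]
--     return [token]
--
--
-- def _split_contractions(tokens):
--     return [piece for token in tokens for piece in _expand(token)]
-- ===== Notes on version B (the rewrite author's own statement) =====
-- stated objective: simpler
-- what changed: B replaces A's lowercase-whole-token plus three-suffix endswith loop with a single rpartition at the last apostrophe followed by set lookups of the suffix and stem, emitted through a per-token expand helper and a flat comprehension instead of an append-with-flag loop.
import Mathlib
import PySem

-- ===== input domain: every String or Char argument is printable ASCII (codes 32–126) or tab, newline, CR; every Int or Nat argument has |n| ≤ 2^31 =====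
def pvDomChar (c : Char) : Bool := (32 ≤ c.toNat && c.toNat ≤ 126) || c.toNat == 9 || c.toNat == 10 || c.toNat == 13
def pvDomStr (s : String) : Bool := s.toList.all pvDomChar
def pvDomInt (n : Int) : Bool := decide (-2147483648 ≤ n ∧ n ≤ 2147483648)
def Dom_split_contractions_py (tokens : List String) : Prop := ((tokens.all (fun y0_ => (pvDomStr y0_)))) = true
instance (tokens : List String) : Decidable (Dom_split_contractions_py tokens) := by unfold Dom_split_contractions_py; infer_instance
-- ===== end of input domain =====

-- B replaces A's lowercase-then-three-suffix endswith loop by one rpartition at the last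
-- apostrophe plus set lookups (objective: simpler). Same return value on every input.

-- shared module constant: _BE_CONTRACTION_STARTERS (a frozenset of strings, as List Char keys)
def pvStarters : PySem.Set (List Char) := PySem.Set.ofList
  [['i'], ['y','o','u'], ['h','e'], ['s','h','e'], ['i','t'], ['w','e'], ['t','h','e','y'],
   ['t','h','a','t'], ['t','h','i','s'], ['t','h','e','r','e'], ['h','e','r','e'],
   ['w','h','o'], ['w','h','a','t'], ['w','h','e','r','e'], ['w','h','e','n'], ['h','o','w']]

-- ===== PORT A =====
-- the inner  for suffix in ("'s", "'re", "'m"): … break  loop; `break` = stop recursing,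
-- returns the updated result list and the `split` flag
def pvLoopA (token : String) (low : List Char) (result : List String) :
    List (List Char) → (List String × Bool)
  | [] => (result, false)
  | suf :: rest =>
    if PySem.Chars.endswith low suf && decide (token.toList.length > suf.length) then
      let stem := PySem.List.slice token.toList none (some (-(suf.length : Int)))
      if PySem.Set.contains pvStarters (PySem.Chars.lower stem) then
        (result ++ [String.ofList stem, String.ofList suf], true)
      else pvLoopA token low result rest
    else pvLoopA token low result rest

def split_contractions_py (tokens : List String) : List String :=
  tokens.foldl (fun result token =>
    let low := PySem.Chars.lower token.toList
    let r := pvLoopA token low result [['\'','s'], ['\'','r','e'], ['\'','m']]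
    if r.2 then r.1 else r.1 ++ [token]) []

-- ===== PORT B =====
def pvSuffixes : PySem.Set (List Char) := PySem.Set.ofList [['\'','s'], ['\'','r','e'], ['\'','m']]

-- token.rpartition("'") for the one-char separator "'": some (stem, after) when the
-- separator occurs (split at its LAST occurrence), none when it does not (exact)
def pvRPart : List Char → Option (List Char × List Char)
  | [] => none
  | c :: rest =>
    match pvRPart rest with
    | some (st, af) => some (c :: st, af)
    | none => if c = '\'' then some ([], rest) else none

def pvExpand (token : String) : List String :=
  match pvRPart token.toList with
  | some (stem, after) =>
    let suffix := PySem.Chars.lower ('\'' :: after)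
    if PySem.Set.contains pvSuffixes suffix && !stem.isEmpty
        && PySem.Set.contains pvStarters (PySem.Chars.lower stem) then
      [String.ofList stem, String.ofList suffix]
    else [token]
  | none => [token]

def split_contractions_py_alt (tokens : List String) : List String :=
  tokens.flatMap pvExpand

-- ===== PRECONDITION & SPEC =====
def Spec_split_contractions_py (tokens : List String) (out : List String) : Prop := out = split_contractions_py_alt tokens
instance (tokens : List String) (out : List String) : Decidable (Spec_split_contractions_py tokens out) := by unfold Spec_split_contractions_py; infer_instance

-- ===== CLAIM (what is proved, stated in full; the proofs are below) =====
def Claim_equal_split_contractions_py : Prop := ∀ (tokens : List String), Dom_split_contractions_py tokens → Spec_split_contractions_py tokens (split_contractions_py tokens)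


-- ===== LEMMAS AND PROOFS =====
lemma pvLowerChar_eq_apos {c : Char} (h : PySem.Chars.lowerChar c = '\'') : c = '\'' := by
  unfold PySem.Chars.lowerChar at h
  split_ifs at h with hc
  · exfalso
    have hc' : 'A' ≤ c ∧ c ≤ 'Z' := by simpa [PySem.Chars.isupper] using hc
    have h1 : 65 ≤ c.toNat := Fin.mk_le_mk.mp hc'.1
    have h2 : c.toNat ≤ 90 := Fin.mk_le_mk.mp hc'.2
    have h39 : (Char.ofNat (c.toNat + 32)).toNat = 39 := by rw [h]; decide
    rw [Char.toNat_ofNat] at h39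
    have hv : (c.toNat + 32).isValidChar := Or.inl (by omega)
    rw [if_pos hv] at h39
    omega
  · exact h

lemma pvRPart_none {cs : List Char} (h : pvRPart cs = none) : '\'' ∉ cs := by
  induction cs with
  | nil => simp
  | cons c rest ih =>
    simp only [pvRPart] at h
    cases hr : pvRPart rest with
    | some p => rw [hr] at h; cases p; simp at h
    | none =>
      rw [hr] at h
      split_ifs at h with hc
      simp [List.mem_cons, ih hr]
      intro hcc
      exact hc hcc.symm |>.elim
lemma pvRPart_some {cs st af : List Char} (h : pvRPart cs = some (st, af)) :
    cs = st ++ '\'' :: af ∧ '\'' ∉ af := by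
  induction cs generalizing st af with
  | nil => simp [pvRPart] at h
  | cons c rest ih =>
    simp only [pvRPart] at h
    cases hr : pvRPart rest with
    | some p =>
      rw [hr] at h
      obtain ⟨st', af'⟩ := p
      simp at h
      obtain ⟨hcs, haf⟩ := ih hr
      obtain ⟨h1, h2⟩ := h
      subst h1 h2
      simp [hcs, haf]
    | none =>
      rw [hr] at h
      split_ifs at h with hc
      · injection h with h'
        injection h' with h1 h2
        subst h1 h2 hc
        exact ⟨rfl, pvRPart_none hr⟩


lemma pvNoApos_map {af : List Char} (haf : '\'' ∉ af) : '\'' ∉ PySem.Chars.lower af := by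
  intro hm
  simp only [PySem.Chars.lower, List.mem_map] at hm
  obtain ⟨c, hc, hl⟩ := hm
  exact haf (pvLowerChar_eq_apos hl ▸ hc)

lemma pvEndswith_false_of_no_apos {cs t : List Char} (h : '\'' ∉ cs) :
    PySem.Chars.endswith (PySem.Chars.lower cs) ('\'' :: t) = false := by
  rw [Bool.eq_false_iff]
  intro he
  have hs : ('\'' :: t) <:+ PySem.Chars.lower cs := (PySem.Chars.endswith_iff _ _).mp he
  have : '\'' ∈ PySem.Chars.lower cs := hs.mem (by simp)
  exact pvNoApos_map h this

lemma pvEndswith_iff {st af t : List Char} (haf : '\'' ∉ af) (ht : '\'' ∉ t) :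
    PySem.Chars.endswith (PySem.Chars.lower (st ++ '\'' :: af)) ('\'' :: t) = true ↔
      t = PySem.Chars.lower af := by
  have hmaf : '\'' ∉ PySem.Chars.lower af := pvNoApos_map haf
  have hexp : PySem.Chars.lower (st ++ '\'' :: af)
      = PySem.Chars.lower st ++ '\'' :: PySem.Chars.lower af := by
    simp [PySem.Chars.lower]
    decide
  rw [PySem.Chars.endswith_iff, hexp]
  -- lowerChar fixes the apostrophe
  constructor
  · intro hs
    have hs2 : ('\'' :: PySem.Chars.lower af) <:+
        PySem.Chars.lower st ++ '\'' :: PySem.Chars.lower af := List.suffix_append _ _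
    rcases List.suffix_or_suffix_of_suffix hs hs2 with h1 | h1
    · rcases List.suffix_cons_iff.mp h1 with h2 | h2
      · exact (List.cons.injEq .. ▸ h2).2
      · exact absurd (h2.mem (by simp)) hmaf
    · rcases List.suffix_cons_iff.mp h1 with h2 | h2
      · exact ((List.cons.injEq .. ▸ h2).2).symm
      · exact absurd (h2.mem (by simp)) ht
  · intro h; subst h; exact List.suffix_append _ _

lemma pvLoopA_append (token : String) (low : List Char) (result : List String)
    (sufs : List (List Char)) :
    pvLoopA token low result sufs =
      (result ++ (pvLoopA token low [] sufs).1, (pvLoopA token low [] sufs).2) := by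
  induction sufs generalizing result with
  | nil => simp [pvLoopA]
  | cons suf rest ih =>
    simp only [pvLoopA]
    split_ifs with h1 h2
    · simp
    · rw [ih result, ih []]
    · rw [ih result, ih []]

lemma pvPerToken (token : String) :
    (let low := PySem.Chars.lower token.toList
     let r := pvLoopA token low [] [['\'','s'], ['\'','r','e'], ['\'','m']]
     if r.2 then r.1 else r.1 ++ [token]) = pvExpand token := by
  simp only []
  cases hrp : pvRPart token.toList with
  | none =>
    have hna := pvRPart_none hrp
    have e1 := pvEndswith_false_of_no_apos (t := ['s']) hna
    have e2 := pvEndswith_false_of_no_apos (t := ['r','e']) hna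
    have e3 := pvEndswith_false_of_no_apos (t := ['m']) hna
    simp [pvExpand, hrp, pvLoopA, e1, e2, e3]
  | some p =>
    obtain ⟨st, af⟩ := p
    obtain ⟨hcs, haf⟩ := pvRPart_some hrp
    have e1 := pvEndswith_iff (st := st) haf (t := ['s']) (by decide)
    have e2 := pvEndswith_iff (st := st) haf (t := ['r','e']) (by decide)
    have e3 := pvEndswith_iff (st := st) haf (t := ['m']) (by decide)
    have hlow : PySem.Chars.lower ('\'' :: af) = '\'' :: PySem.Chars.lower af := by
      simp [PySem.Chars.lower]; decide
    have hlaf : (PySem.Chars.lower af).length = af.length := by simp [PySem.Chars.lower]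
    simp only [pvLoopA, pvExpand, hrp]
    rw [hcs]
    by_cases h1 : PySem.Chars.lower af = ['s']
    · have t1 := e1.mpr h1.symm
      have f2 : PySem.Chars.endswith (PySem.Chars.lower (st ++ '\'' :: af)) ['\'', 'r', 'e'] = false := by
        rw [Bool.eq_false_iff]; intro h
        have := e2.mp h; rw [h1] at this; exact absurd this (by decide)
      have f3 : PySem.Chars.endswith (PySem.Chars.lower (st ++ '\'' :: af)) ['\'', 'm'] = false := by
        rw [Bool.eq_false_iff]; intro h
        have := e3.mp h; rw [h1] at this; exact absurd this (by decide)
      have ha1 : af.length = 1 := by rw [← hlaf, h1]; rfl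
      have hlcs : (st ++ '\'' :: af).length = st.length + 2 := by simp [ha1]
      by_cases hst : st = []
      · subst hst
        simp [ha1]
      · have hp : 0 < st.length := List.length_pos_iff.mpr hst
        have hd' : 2 < st.length + (af.length + 1) := by omega
        have hslice2 : PySem.List.slice (st ++ '\'' :: af) none (some (-2)) = st := by
          rw [PySem.List.slice_to_neg_ofNat _ 2 (by omega)]
          simp [ha1]
        have hm : (['\'', 's'] : List Char) ∈ pvSuffixes := by decide
        by_cases hc : PySem.Chars.lower st ∈ pvStarters
        · simp [t1, hslice2, hst, hlow, h1, hm, hc, ha1, hp]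
        · simp [t1, f2, f3, hslice2, hlow, h1, hc, ha1, hp]
    · by_cases h2 : PySem.Chars.lower af = ['r', 'e']
      · have t2 := e2.mpr h2.symm
        have f1 : PySem.Chars.endswith (PySem.Chars.lower (st ++ '\'' :: af)) ['\'', 's'] = false := by
          rw [Bool.eq_false_iff]; intro h
          have := e1.mp h; rw [h2] at this; exact absurd this (by decide)
        have f3 : PySem.Chars.endswith (PySem.Chars.lower (st ++ '\'' :: af)) ['\'', 'm'] = false := by
          rw [Bool.eq_false_iff]; intro h
          have := e3.mp h; rw [h2] at this; exact absurd this (by decide)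
        have ha2 : af.length = 2 := by rw [← hlaf, h2]; rfl
        by_cases hst : st = []
        · subst hst
          simp only [List.nil_append] at f1 f3
          simp [f1, f3, ha2]
        · have hp : 0 < st.length := List.length_pos_iff.mpr hst
          have hslice2 : PySem.List.slice (st ++ '\'' :: af) none (some (-3)) = st := by
            rw [PySem.List.slice_to_neg_ofNat _ 3 (by omega)]
            simp [ha2]
          have hm : (['\'', 'r', 'e'] : List Char) ∈ pvSuffixes := by decide
          by_cases hc : PySem.Chars.lower st ∈ pvStarters
          · simp [f1, t2, hslice2, hst, hlow, h2, hm, hc, ha2, hp]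
          · simp [f1, t2, f3, hslice2, hlow, h2, hm, hc, ha2, hp]
      · by_cases h3 : PySem.Chars.lower af = ['m']
        · have t3 := e3.mpr h3.symm
          have f1 : PySem.Chars.endswith (PySem.Chars.lower (st ++ '\'' :: af)) ['\'', 's'] = false := by
            rw [Bool.eq_false_iff]; intro h
            have := e1.mp h; rw [h3] at this; exact absurd this (by decide)
          have f2 : PySem.Chars.endswith (PySem.Chars.lower (st ++ '\'' :: af)) ['\'', 'r', 'e'] = false := by
            rw [Bool.eq_false_iff]; intro h
            have := e2.mp h; rw [h3] at this; exact absurd this (by decide)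
          have ha1 : af.length = 1 := by rw [← hlaf, h3]; rfl
          by_cases hst : st = []
          · subst hst
            simp [ha1]
          · have hp : 0 < st.length := List.length_pos_iff.mpr hst
            have hslice2 : PySem.List.slice (st ++ '\'' :: af) none (some (-2)) = st := by
              rw [PySem.List.slice_to_neg_ofNat _ 2 (by omega)]
              simp [ha1]
            have hm : (['\'', 'm'] : List Char) ∈ pvSuffixes := by decide
            by_cases hc : PySem.Chars.lower st ∈ pvStarters
            · simp [f1, f2, t3, hslice2, hst, hlow, h3, hm, hc, ha1, hp]
            · simp [f1, f2, t3, hslice2, hlow, h3, hm, hc, ha1, hp]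
        · have f1 : PySem.Chars.endswith (PySem.Chars.lower (st ++ '\'' :: af)) ['\'', 's'] = false := by
            rw [Bool.eq_false_iff]; intro h; exact h1 (e1.mp h).symm
          have f2 : PySem.Chars.endswith (PySem.Chars.lower (st ++ '\'' :: af)) ['\'', 'r', 'e'] = false := by
            rw [Bool.eq_false_iff]; intro h; exact h2 (e2.mp h).symm
          have f3 : PySem.Chars.endswith (PySem.Chars.lower (st ++ '\'' :: af)) ['\'', 'm'] = false := by
            rw [Bool.eq_false_iff]; intro h; exact h3 (e3.mp h).symm
          have hnm : ('\'' :: PySem.Chars.lower af) ∉ pvSuffixes := by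
            intro hmem
            have hps : pvSuffixes = [['\'', 's'], ['\'', 'r', 'e'], ['\'', 'm']] := by decide
            rw [hps] at hmem
            simp at hmem
            rcases hmem with h | h | h
            · exact h1 h
            · exact h2 h
            · exact h3 h
          simp [f1, f2, f3, hlow, hnm]


-- ===== VERDICT (by name: the statement is the Claim_ definition above) =====
theorem split_contractions_py_spec : Claim_equal_split_contractions_py := by
  intro tokens _
  unfold Spec_split_contractions_py split_contractions_py split_contractions_py_alt
  have hb : ∀ (result : List String) (token : String),
      (let low := PySem.Chars.lower token.toList
       let r := pvLoopA token low result [['\'','s'], ['\'','r','e'], ['\'','m']]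
       if r.2 then r.1 else r.1 ++ [token]) = result ++ pvExpand token := by
    intro result token
    simp only [pvLoopA_append token _ result]
    rw [← pvPerToken token]
    simp only []
    split_ifs <;> simp
  calc List.foldl _ [] tokens
      = List.foldl (fun acc x => acc ++ pvExpand x) [] tokens := by
        apply PySem.List.foldl_congr_mem
        intro acc x _
        exact hb acc x
    _ = tokens.flatMap pvExpand := by
        rw [PySem.List.foldl_append_eq_flatMap]; simp
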